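-- pv_equiv track=rewrite | github.com/Rshcaroline/UCSD-CSE256-Statistical-NLP | Assignment 3/replace_with_rare_classes.py | get_rare_word_classes
-- ===== SOURCE A (Python) =====
-- import string
--
-- def get_rare_word_classes(word):
--     """
--     Grouping rare words into informative word classes
--     """
--     if any(c in string.punctuation for c in word):
--         return '_CONTAIN_PUNCTUATION'
--     if all(c in string.punctuation for c in word):
--         return '_ALL_PUNCTUATION'
--     if any(c.isdigit() for c in word):
--         return '_CONTAIN_NUMERIC_'
--     if all(c.isdigit() for c in word):
--         return '_ALL_NUMERIC_'
--     if word[0].isupper():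
--         return '_FIRST_CAP_'
--     if word.isupper():
--         return '_ALL_CAP_'
--     if word[-1].isupper():
--         return '_LAST_CAP_'
--     return '_RARE_'
-- ===== SOURCE B (Python) =====
-- import string
--
-- def get_rare_word_classes(word):
--     """
--     Grouping rare words into informative word classes
--     (single linear pass computing flags, then the decision cascade)
--     """
--     has_punct = False
--     all_punct = True
--     has_digit = False
--     has_alpha = False
--     has_lower = False
--     for c in word:
--         p = c in string.punctuation
--         has_punct = has_punct or p
--         all_punct = all_punct and p
--         has_digit = has_digit or c.isdigit()
--         has_alpha = has_alpha or c.isalpha()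
--         has_lower = has_lower or c.islower()
--     if has_punct:
--         return '_CONTAIN_PUNCTUATION'
--     if all_punct:
--         return '_ALL_PUNCTUATION'
--     if has_digit:
--         return '_CONTAIN_NUMERIC_'
--     if word[0].isupper():
--         return '_FIRST_CAP_'
--     if has_alpha and not has_lower:
--         return '_ALL_CAP_'
--     if word[-1].isupper():
--         return '_LAST_CAP_'
--     return '_RARE_'
-- ===== Notes on version B (the rewrite author's own statement) =====
-- stated objective: simpler
-- what changed: A scans the word up to seven times (any/all generator passes plus str.isupper); B computes five classification flags in one linear pass and runs the same decision cascade on the flags, dropping A's unreachable _ALL_NUMERIC_ branch.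
import Mathlib
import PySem

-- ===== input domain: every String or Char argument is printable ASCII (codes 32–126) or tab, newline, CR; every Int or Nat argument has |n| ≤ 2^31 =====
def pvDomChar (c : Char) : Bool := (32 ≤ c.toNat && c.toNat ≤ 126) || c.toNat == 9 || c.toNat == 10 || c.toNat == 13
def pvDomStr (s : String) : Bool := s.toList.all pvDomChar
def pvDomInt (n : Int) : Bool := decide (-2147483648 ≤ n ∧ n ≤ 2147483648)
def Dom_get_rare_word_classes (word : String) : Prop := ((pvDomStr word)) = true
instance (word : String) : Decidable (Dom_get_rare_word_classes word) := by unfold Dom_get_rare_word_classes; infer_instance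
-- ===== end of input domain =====

-- B replaces A's seven separate scans of the word by ONE linear pass computing five flags,
-- then runs the same decision cascade on the flags, dropping A's unreachable _ALL_NUMERIC_ branch (objective: simpler).

-- ===== PORT A =====
-- c ∈ string.punctuation (single-character membership; exact on the ASCII domain)
def pvIsPunct (c : Char) : Bool :=
  "!\"#$%&'()*+,-./:;<=>?@[\\]^_`{|}~".toList.contains c

-- hand port of str.isupper(): at least one cased char and no lowercase char; exact on ASCII,
-- where the cased characters are exactly the letters
def pvStrIsupper (cs : List Char) : Bool :=
  cs.any PySem.Chars.isalpha && !(cs.any PySem.Chars.islower)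

def get_rare_word_classes (word : String) : String :=
  let cs := word.toList
  if cs.any pvIsPunct then "_CONTAIN_PUNCTUATION"
  else if cs.all pvIsPunct then "_ALL_PUNCTUATION"
  else if cs.any PySem.Chars.isdigit then "_CONTAIN_NUMERIC_"
  else if cs.all PySem.Chars.isdigit then "_ALL_NUMERIC_"
  -- word[0] / word[-1]: only reached on a nonempty word (the empty word returns above), so the
  -- guarded access never raises; `getD false` encodes the (unreachable) empty case
  else if ((PySem.List.pyGet? cs 0).map PySem.Chars.isupper).getD false then "_FIRST_CAP_"
  else if pvStrIsupper cs then "_ALL_CAP_"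
  else if ((PySem.List.pyGet? cs (-1)).map PySem.Chars.isupper).getD false then "_LAST_CAP_"
  else "_RARE_"

-- ===== PORT B =====
-- the flag state: (has_punct, all_punct, has_digit, has_alpha, has_lower)
def pvStep (f : Bool × Bool × Bool × Bool × Bool) (c : Char) : Bool × Bool × Bool × Bool × Bool :=
  (f.1 || pvIsPunct c,
   f.2.1 && pvIsPunct c,
   f.2.2.1 || PySem.Chars.isdigit c,
   f.2.2.2.1 || PySem.Chars.isalpha c,
   f.2.2.2.2 || PySem.Chars.islower c)

def get_rare_word_classes_alt (word : String) : String :=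
  let cs := word.toList
  let f := cs.foldl pvStep (false, true, false, false, false)
  if f.1 then "_CONTAIN_PUNCTUATION"
  else if f.2.1 then "_ALL_PUNCTUATION"
  else if f.2.2.1 then "_CONTAIN_NUMERIC_"
  else if ((PySem.List.pyGet? cs 0).map PySem.Chars.isupper).getD false then "_FIRST_CAP_"
  else if f.2.2.2.1 && !f.2.2.2.2 then "_ALL_CAP_"
  else if ((PySem.List.pyGet? cs (-1)).map PySem.Chars.isupper).getD false then "_LAST_CAP_"
  else "_RARE_"

-- ===== PRECONDITION & SPEC =====
def Spec_get_rare_word_classes (word : String) (out : String) : Prop := out = get_rare_word_classes_alt word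
instance (word : String) (out : String) : Decidable (Spec_get_rare_word_classes word out) := by unfold Spec_get_rare_word_classes; infer_instance

-- ===== CLAIM (what is proved, stated in full; the proofs are below) =====
def Claim_equal_get_rare_word_classes : Prop := ∀ (word : String), Dom_get_rare_word_classes word → Spec_get_rare_word_classes word (get_rare_word_classes word)

-- ===== LEMMAS AND PROOFS =====

-- the one-pass fold computes exactly the five scans
theorem pvStep_spec (cs : List Char) : ∀ (a b c d e : Bool),
    cs.foldl pvStep (a, b, c, d, e) =
      (a || cs.any pvIsPunct, b && cs.all pvIsPunct, c || cs.any PySem.Chars.isdigit,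
       d || cs.any PySem.Chars.isalpha, e || cs.any PySem.Chars.islower) := by
  induction cs with
  | nil => simp
  | cons x xs ih =>
      intro a b c d e
      simp only [List.foldl_cons, pvStep, List.any_cons, List.all_cons, ih]
      simp [Bool.or_assoc, Bool.and_assoc]

-- ===== VERDICT (by name: the statement is the Claim_ definition above) =====
theorem get_rare_word_classes_spec : Claim_equal_get_rare_word_classes := by
  intro word _
  unfold Spec_get_rare_word_classes get_rare_word_classes get_rare_word_classes_alt
  simp only [pvStep_spec, Bool.false_or, Bool.true_and, pvStrIsupper]
  -- the two cascades differ only in A's unreachable "_ALL_NUMERIC_" branch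
  cases hcs : word.toList with
  | nil => simp
  | cons x xs =>
      by_cases h1 : (x :: xs).any pvIsPunct
      · simp [h1]
      simp only [h1, Bool.not_eq_true] at *
      simp only [h1, Bool.false_eq_true, if_false]
      by_cases h2 : (x :: xs).all pvIsPunct <;> simp only [h2, if_true, Bool.false_eq_true, if_false]
      by_cases h3 : (x :: xs).any PySem.Chars.isdigit <;> simp only [h3, if_true, Bool.false_eq_true, if_false]
      have h4 : (x :: xs).all PySem.Chars.isdigit = false := by
        simp only [List.any_cons, Bool.or_eq_true] at h3
        push_neg at h3
        simp [h3.1]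
      simp [h4]
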